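-- pv_equiv track=rewrite | github.com/Benny418/EASY_NL_SMS_SYSTEM | modules/sms_gateway.py | format_phone_list
-- ===== SOURCE A (Python) =====
-- from typing import List, Dict, Optional, Tuple
--
-- def format_phone_list(phone_string: str) -> List[str]:
--     """將電話字串格式化為清單"""
--     # 支援逗號或分號分隔
--     separators = [',', ';']
--     phone_list = [phone_string]
--
--     for sep in separators:
--         new_list = []
--         for phone in phone_list:
--             new_list.extend(phone.split(sep))
--         phone_list = new_list
--
--     # 清理並過濾空白
--     phone_list = [phone.strip() for phone in phone_list if phone.strip()]
--
--     return phone_list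
-- ===== SOURCE B (Python) =====
-- def format_phone_list(phone_string):
--     """Single pass over the string: cut at ',' or ';', strip and keep non-empty pieces."""
--     result = []
--     cur = []
--     for ch in phone_string:
--         if ch == ',' or ch == ';':
--             piece = ''.join(cur).strip()
--             if piece:
--                 result.append(piece)
--             cur = []
--         else:
--             cur.append(ch)
--     piece = ''.join(cur).strip()
--     if piece:
--         result.append(piece)
--     return result
-- ===== Notes on version B (the rewrite author's own statement) =====
-- stated objective: alternative
-- what changed: A builds an intermediate list by staged splitting (first on ',', then each fragment on ';') and then strips/filters in a final comprehension; B is a single left-to-right character scan that cuts at either delimiter and strips/filters each piece as it is produced, building no intermediate fragment lists.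
import Mathlib
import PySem

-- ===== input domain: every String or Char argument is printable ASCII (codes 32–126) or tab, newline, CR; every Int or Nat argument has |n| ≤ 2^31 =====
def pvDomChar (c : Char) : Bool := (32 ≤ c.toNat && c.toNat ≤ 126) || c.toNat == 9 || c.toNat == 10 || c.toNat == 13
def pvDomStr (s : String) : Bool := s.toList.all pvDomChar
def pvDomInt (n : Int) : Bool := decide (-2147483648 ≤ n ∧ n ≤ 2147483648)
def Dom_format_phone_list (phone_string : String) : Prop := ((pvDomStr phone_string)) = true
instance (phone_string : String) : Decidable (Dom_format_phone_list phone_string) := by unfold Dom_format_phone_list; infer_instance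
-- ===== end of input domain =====

-- B replaces A's staged comma-then-semicolon splitting by a single left-to-right scan that
-- cuts at either delimiter and strips/filters each piece as it is produced (alternative, same cost).


-- ===== PORT A =====
-- literal port of A: split on ',' first, then each fragment on ';', then strip and drop empties
def format_phone_list (phone_string : String) : List String :=
  let separators : List String := [",", ";"]
  let phone_list : List String := [phone_string]
  let phone_list := separators.foldl
    (fun pl sep => pl.foldl
      (fun new_list phone => new_list ++ ((PySem.Str.split? phone sep).getD [])) [])
    phone_list
  -- .getD [] is unreachable: both separators are non-empty, so split? never returns none
  (phone_list.filter (fun phone => PySem.Str.strip phone ≠ "")).map PySem.Str.strip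

-- ===== PORT B =====
def pvIsSep (c : Char) : Bool := c == ',' || c == ';'

-- ''.join(cur).strip(): append the stripped current piece if non-empty
def pvFlush (cur : List Char) (result : List String) : List String :=
  let piece := PySem.Chars.strip cur
  if piece = [] then result else result ++ [String.ofList piece]

def pvScan : List Char → List Char → List String → List String
  | [], cur, result => pvFlush cur result
  | c :: rest, cur, result =>
      if pvIsSep c then pvScan rest [] (pvFlush cur result)
      else pvScan rest (cur ++ [c]) result

def format_phone_list_alt (phone_string : String) : List String :=
  pvScan phone_string.toList [] []

-- ===== PRECONDITION & SPEC =====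
def Spec_format_phone_list (phone_string : String) (out : List String) : Prop := out = format_phone_list_alt phone_string
instance (phone_string : String) (out : List String) : Decidable (Spec_format_phone_list phone_string out) := by unfold Spec_format_phone_list; infer_instance

-- ===== CLAIM (what is proved, stated in full; the proofs are below) =====
def Claim_equal_format_phone_list : Prop := ∀ (phone_string : String), Dom_format_phone_list phone_string → Spec_format_phone_list phone_string (format_phone_list phone_string)

-- ===== LEMMAS AND PROOFS =====

-- (first piece, remaining pieces) of a split at characters satisfying p
def pvSb (p : Char → Bool) : List Char → List Char × List (List Char)
  | [] => ([], [])
  | c :: rest =>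
      let r := pvSb p rest
      if p c then ([], r.1 :: r.2) else (c :: r.1, r.2)

def pvPieces (p : Char → Bool) (l : List Char) : List (List Char) :=
  (pvSb p l).1 :: (pvSb p l).2

def pvConsHead (c : Char) : List (List Char) → List (List Char)
  | [] => [[c]]
  | x :: xs => (c :: x) :: xs

-- strip every piece and keep the non-empty ones, as strings
def pvSf : List (List Char) → List String :=
  List.filterMap (fun x =>
    let q := PySem.Chars.strip x
    if q = [] then none else some (String.ofList q))

theorem pvPieces_cons (p : Char → Bool) (c : Char) (rest : List Char) :
    pvPieces p (c :: rest) =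
      if p c then [] :: pvPieces p rest else pvConsHead c (pvPieces p rest) := by
  by_cases h : p c <;> simp [pvPieces, pvSb, pvConsHead, h]

theorem pvSplitOn_go (c : Char) :
    ∀ (fuel : Nat) (l cur : List Char) (acc : List (List Char)), l.length ≤ fuel →
      PySem.Chars.splitOn.go [c] fuel l cur acc =
        acc.reverse ++ (cur.reverse ++ (pvSb (· == c) l).1) :: (pvSb (· == c) l).2 := by
  intro fuel
  induction fuel with
  | zero =>
      intro l cur acc h
      have : l = [] := List.eq_nil_of_length_eq_zero (Nat.le_zero.mp h)
      subst this
      simp [PySem.Chars.splitOn.go, pvSb]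
  | succ f ih =>
      intro l cur acc h
      cases l with
      | nil => simp [PySem.Chars.splitOn.go, pvSb]
      | cons c' rest =>
          by_cases hc : c = c'
          · subst hc
            rw [PySem.Chars.splitOn.go]
            simp only [List.isPrefixOf, beq_self_eq_true, Bool.true_and, List.isPrefixOf_nil_left,
              if_true, List.length_cons, List.length_nil, Nat.zero_add, List.drop_succ_cons,
              List.drop_zero]
            rw [ih rest [] ((cur.reverse) :: acc) (by simpa using Nat.le_of_succ_le_succ h)]
            simp [pvSb]
          · rw [PySem.Chars.splitOn.go]
            have hpre : [c].isPrefixOf (c' :: rest) = false := by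
              simp [List.isPrefixOf, hc]
            rw [hpre]
            simp only [Bool.false_eq_true, if_false]
            rw [ih rest (c' :: cur) acc (by simpa using Nat.le_of_succ_le_succ h)]
            simp [pvSb, Ne.symm hc]

theorem pvSplitOn_single (c : Char) (l : List Char) :
    PySem.Chars.splitOn l [c] = pvPieces (· == c) l := by
  unfold PySem.Chars.splitOn
  rw [pvSplitOn_go c (l.length + 1) l [] [] (Nat.le_succ _)]
  simp [pvPieces]

theorem pvFlatMap_consHead (q : Char → Bool) (c : Char) (x : List Char) (xs : List (List Char)) :
    (pvConsHead c (x :: xs)).flatMap (pvPieces q) =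
      if q c then [] :: (x :: xs).flatMap (pvPieces q)
      else pvConsHead c ((x :: xs).flatMap (pvPieces q)) := by
  by_cases h : q c <;> simp [pvConsHead, pvPieces, pvSb, h, List.flatMap_cons]

theorem pvFlatMap_pieces (p q : Char → Bool) (l : List Char) :
    (pvPieces p l).flatMap (pvPieces q) = pvPieces (fun c => p c || q c) l := by
  induction l with
  | nil => simp [pvPieces, pvSb, List.flatMap_cons]
  | cons c rest ih =>
      rw [pvPieces_cons, pvPieces_cons]
      by_cases hp : p c
      · simp only [hp, Bool.true_or, if_true]
        rw [List.flatMap_cons, ih]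
        show pvPieces q [] ++ _ = _
        simp [pvPieces, pvSb]
      · simp only [hp, Bool.false_eq_true, if_false, Bool.false_or]
        obtain ⟨x, xs, hx⟩ : ∃ x xs, pvPieces p rest = x :: xs :=
          ⟨_, _, rfl⟩
        rw [hx, pvFlatMap_consHead, ← hx, ih]

theorem pvSf_cons (x : List Char) (ps : List (List Char)) :
    pvSf (x :: ps) =
      (if PySem.Chars.strip x = [] then [] else [String.ofList (PySem.Chars.strip x)]) ++ pvSf ps := by
  by_cases h : PySem.Chars.strip x = [] <;> simp [pvSf, h]

theorem pvScan_eq (l : List Char) :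
    ∀ (cur : List Char) (result : List String),
      pvScan l cur result =
        result ++ pvSf ((cur ++ (pvSb pvIsSep l).1) :: (pvSb pvIsSep l).2) := by
  induction l with
  | nil =>
      intro cur result
      simp [pvScan, pvFlush, pvSb, pvSf]
      split_ifs <;> simp_all
  | cons c rest ih =>
      intro cur result
      by_cases h : pvIsSep c = true
      · rw [pvScan, if_pos h, ih]
        simp [pvSb, h, pvFlush, pvSf_cons]
        split_ifs <;> simp
      · rw [pvScan, if_neg h, ih]
        simp [pvSb, h, pvSf_cons, List.append_assoc]

theorem pvStrip_ofList (x : List Char) :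
    PySem.Str.strip (String.ofList x) = String.ofList (PySem.Chars.strip x) := by
  apply String.toList_inj.mp
  simp [PySem.Str.toList_strip]

theorem pvFilterMap_ofList (ql : List (List Char)) :
    ((ql.map String.ofList).filter (fun p => PySem.Str.strip p ≠ "")).map PySem.Str.strip
      = pvSf ql := by
  induction ql with
  | nil => simp [pvSf]
  | cons x xs ih =>
      rw [List.map_cons, List.filter_cons]
      simp only [ne_eq, decide_not] at ih
      by_cases h : PySem.Chars.strip x = []
      · simp [pvStrip_ofList, h, pvSf_cons, ih]
      · simp [pvStrip_ofList, h, pvSf_cons, ih]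

theorem pvA_eq (s : String) :
    format_phone_list s = pvSf (pvPieces pvIsSep s.toList) := by
  unfold format_phone_list
  simp only [List.foldl_cons, List.foldl_nil, List.foldl_nil, List.nil_append]
  rw [PySem.List.foldl_append_eq_flatMap]
  simp only [List.nil_append]
  rw [show ((PySem.Str.split? s ",").getD []) =
        List.map String.ofList (pvPieces (· == ',') s.toList) by
    simp [PySem.Str.split?, PySem.Chars.split?, pvSplitOn_single]]
  rw [List.flatMap_map]
  have hinner : (fun x => (PySem.Str.split? (String.ofList x) ";").getD []) =
      fun x => List.map String.ofList (pvPieces (· == ';') x) := by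
    funext x
    simp [PySem.Str.split?, PySem.Chars.split?, pvSplitOn_single]
  rw [hinner]
  rw [← List.map_flatMap]
  rw [pvFlatMap_pieces]
  rw [pvFilterMap_ofList]
  rfl

-- ===== VERDICT (by name: the statement is the Claim_ definition above) =====
theorem format_phone_list_spec : Claim_equal_format_phone_list := by
  intro s _
  unfold Spec_format_phone_list format_phone_list_alt
  rw [pvScan_eq, pvA_eq]
  simp [pvPieces]
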